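-- pv_equiv track=rewrite | github.com/michplunkett/one-offs | util/general.py | list_to_parsed_set
-- ===== SOURCE A (Python) =====
-- def list_to_parsed_set(unparsed_list: [str], delimiter: str = "/"):
--     unparsed_list.sort()
--     parsed_set = set()
--     for element in unparsed_list:
--         if delimiter in element:
--             for p in element.split(delimiter):
--                 fmt_element = p.strip().lower()
--                 if p:
--                     parsed_set.add(fmt_element)
--         else:
--             fmt_element = element.strip().lower()
--             parsed_set.add(fmt_element)
--
--     # Remove any empty values from set
--     if "" in parsed_set:
--         parsed_set.remove("")
--     return parsed_set
-- ===== SOURCE B (Python) =====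
-- def list_to_parsed_set(unparsed_list, delimiter="/"):
--     unparsed_list.sort()
--     parsed_set = set()
--     for element in unparsed_list:
--         i, n, k = 0, len(element), len(delimiter)
--         token = []
--         while i < n:
--             if k and element.startswith(delimiter, i):
--                 parsed_set.add("".join(token).strip().lower())
--                 token = []
--                 i += k
--             else:
--                 token.append(element[i])
--                 i += 1
--         parsed_set.add("".join(token).strip().lower())
--     parsed_set.discard("")
--     return parsed_set
-- ===== Notes on version B (the rewrite author's own statement) =====
-- stated objective: alternative
-- what changed: Replaces the delimiter-membership test, str.split and the per-part guards by a hand-written character-level tokenizer: an explicit index/token-buffer scan of each string that matches the delimiter with startswith and emits each normalized token directly into the set, so no split list and no if/else on delimiter membership exist at all.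
import Mathlib
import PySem

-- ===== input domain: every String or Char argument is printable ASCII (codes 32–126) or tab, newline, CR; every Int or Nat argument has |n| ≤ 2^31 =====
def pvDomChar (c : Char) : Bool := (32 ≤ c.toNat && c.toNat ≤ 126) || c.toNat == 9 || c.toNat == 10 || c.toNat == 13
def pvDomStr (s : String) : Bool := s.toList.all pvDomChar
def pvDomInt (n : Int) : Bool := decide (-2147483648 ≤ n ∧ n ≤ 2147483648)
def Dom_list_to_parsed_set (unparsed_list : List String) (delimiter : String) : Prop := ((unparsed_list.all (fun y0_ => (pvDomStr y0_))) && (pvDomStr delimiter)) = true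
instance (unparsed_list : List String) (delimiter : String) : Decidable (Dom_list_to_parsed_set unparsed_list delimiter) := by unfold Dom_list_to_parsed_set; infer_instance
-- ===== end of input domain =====

-- B replaces A's `in`-test / str.split / guarded inner loop by a hand-written character-level
-- tokenizer (explicit position and token buffer, startswith matching, tokens normalized as they
-- are emitted) — objective: alternative, same cost. Both Pythons sort unparsed_list in place;
-- the equivalence proved here is about the RETURN value (B performs the same mutation).

-- ===== PORT A =====
def list_to_parsed_set (unparsed_list : List String) (delimiter : String) : List String :=
  -- unparsed_list.sort() is in place; the loop iterates the sorted list
  let parsed_set : PySem.Set String :=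
    (PySem.List.sorted unparsed_list (fun x => x) false).foldl (fun parsed_set element =>
      if PySem.Str.isIn delimiter element then
        match PySem.Str.split? element delimiter with
        | some parts =>
            parts.foldl (fun parsed_set p =>
              let fmt_element := PySem.Str.lower (PySem.Str.strip p)
              if p ≠ "" then PySem.Set.add parsed_set fmt_element else parsed_set) parsed_set
        | none => parsed_set  -- split with delimiter "" raises ValueError; excluded by Pre_
      else
        let fmt_element := PySem.Str.lower (PySem.Str.strip element)
        PySem.Set.add parsed_set fmt_element) PySem.Set.empty
  if PySem.Set.contains parsed_set "" then
    match PySem.Set.remove? parsed_set "" with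
    | some s => s
    | none => parsed_set  -- unreachable: guarded by the contains test
  else parsed_set

-- ===== PORT B =====
-- parsed_set.add("".join(token).strip().lower())
def pvEmit (parsed : PySem.Set String) (token : List Char) : PySem.Set String :=
  PySem.Set.add parsed (PySem.Str.lower (PySem.Str.strip (String.ofList token)))

-- B's while loop over the character position i, transcribed as recursion on the suffix
-- element[i:]: `k and element.startswith(delimiter, i)` is `dl ≠ [] ∧ dl.isPrefixOf l`; the
-- fuel argument (called with the element's length, = the loop's iteration bound n) only makes
-- the recursion structural — the out-of-fuel branch is never reached when fuel ≥ l.length.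
def pvScan (dl : List Char) (fuel : Nat) (l : List Char) (token : List Char)
    (parsed : PySem.Set String) : PySem.Set String :=
  match fuel, l with
  | _, [] => pvEmit parsed token
  | 0, _ :: _ => parsed
  | fuel + 1, c :: rest =>
    if dl ≠ [] ∧ dl.isPrefixOf (c :: rest) then
      pvScan dl fuel (List.drop dl.length (c :: rest)) [] (pvEmit parsed token)
    else
      pvScan dl fuel rest (token ++ [c]) parsed

def list_to_parsed_set_alt (unparsed_list : List String) (delimiter : String) : List String :=
  -- unparsed_list.sort() is in place; the loop iterates the sorted list
  let parsed_set : PySem.Set String :=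
    (PySem.List.sorted unparsed_list (fun x => x) false).foldl
      (fun parsed element => pvScan delimiter.toList element.toList.length element.toList [] parsed)
      PySem.Set.empty
  PySem.Set.discard parsed_set ""

-- ===== PRECONDITION & SPEC =====
-- Pre_ excludes exactly the inputs on which A raises ValueError:
-- a non-empty list together with the empty delimiter, where str.split("") raises.
def Pre_list_to_parsed_set (unparsed_list : List String) (delimiter : String) : Prop :=
  unparsed_list = [] ∨ delimiter ≠ ""
instance (unparsed_list : List String) (delimiter : String) : Decidable (Pre_list_to_parsed_set unparsed_list delimiter) := by unfold Pre_list_to_parsed_set; infer_instance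

def pvWitness_list_to_parsed_set : List String × String := (["B/ a", "c", "a /d", ""], "/")

def Spec_list_to_parsed_set (unparsed_list : List String) (delimiter : String) (out : List String) : Prop := out = list_to_parsed_set_alt unparsed_list delimiter
instance (unparsed_list : List String) (delimiter : String) (out : List String) : Decidable (Spec_list_to_parsed_set unparsed_list delimiter out) := by unfold Spec_list_to_parsed_set; infer_instance

-- ===== CLAIM (what is proved, stated in full; the proofs are below) =====
def Claim_equal_list_to_parsed_set : Prop := ∀ (unparsed_list : List String) (delimiter : String), Dom_list_to_parsed_set unparsed_list delimiter → Pre_list_to_parsed_set unparsed_list delimiter → Spec_list_to_parsed_set unparsed_list delimiter (list_to_parsed_set unparsed_list delimiter)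

-- ===== LEMMAS AND PROOFS =====

-- p.strip().lower(), the common formatting step of both programs
def pvFmt (p : String) : String := PySem.Str.lower (PySem.Str.strip p)

-- the per-element sequence of values A inserts into the set
def pvSeqA (d e : String) : List String :=
  if PySem.Str.isIn d e then
    (((PySem.Str.split? e d).getD []).filter (fun p => p ≠ "")).map pvFmt
  else [pvFmt e]

-- the per-element sequence of values B emits into the set
def pvSeqB (d e : String) : List String :=
  ((PySem.Str.split? e d).getD []).map pvFmt

-- splitOn finds no match anywhere: the accumulating loop returns one piece
lemma pv_splitOn_go_no_match (sep : List Char) :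
    ∀ (fuel : Nat) (l cur : List Char) (acc : List (List Char)),
      l.length < fuel → (∀ j, sep.isPrefixOf (l.drop j) = false) →
      PySem.Chars.splitOn.go sep fuel l cur acc = ((cur.reverse ++ l) :: acc).reverse := by
  intro fuel
  induction fuel with
  | zero => intro l cur acc h _; omega
  | succ fuel ih =>
    intro l cur acc h hnp
    cases l with
    | nil => simp [PySem.Chars.splitOn.go]
    | cons c rest =>
      have h0 : sep.isPrefixOf (c :: rest) = false := by simpa using hnp 0
      rw [show PySem.Chars.splitOn.go sep (fuel + 1) (c :: rest) cur acc
            = PySem.Chars.splitOn.go sep fuel rest (c :: cur) acc from by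
            simp [PySem.Chars.splitOn.go, h0]]
      rw [ih rest (c :: cur) acc (by simpa using Nat.lt_of_succ_lt_succ h)
            (fun j => by simpa using hnp (j + 1))]
      simp

lemma pv_splitOn_no_match (s sep : List Char) (h : PySem.Chars.isIn sep s = false) :
    PySem.Chars.splitOn s sep = [s] := by
  have hnp : ∀ j, sep.isPrefixOf (s.drop j) = false := by
    intro j
    rw [Bool.eq_false_iff]
    intro hj
    have hex : ∃ j, sep <+: s.drop j := ⟨j, List.isPrefixOf_iff_prefix.mp hj⟩
    rw [PySem.Chars.exists_prefix_drop_iff_isIn] at hex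
    simp [h] at hex
  unfold PySem.Chars.splitOn
  rw [pv_splitOn_go_no_match sep (s.length + 1) s [] [] (by omega) hnp]
  simp

lemma pv_toList_ne_nil (d : String) (hd : d ≠ "") : d.toList ≠ [] := by
  intro h
  apply hd
  have h2 : d.toList = ("" : String).toList := by simpa using h
  exact String.toList_inj.mp h2

lemma pv_split?_eq_some (e d : String) (hd : d ≠ "") :
    PySem.Str.split? e d = some ((PySem.Chars.splitOn e.toList d.toList).map String.ofList) := by
  simp [PySem.Str.split?, PySem.Chars.split?, pv_toList_ne_nil d hd]

lemma pv_split?_no_match (e d : String) (hd : d ≠ "") (h : PySem.Str.isIn d e = false) :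
    PySem.Str.split? e d = some [e] := by
  rw [pv_split?_eq_some e d hd,
      pv_splitOn_no_match e.toList d.toList (by simpa [PySem.Str.isIn] using h)]
  simp

-- the splitOn accumulator is prepended, reversed, to the result
lemma pv_go_acc (sep : List Char) :
    ∀ (fuel : Nat) (l cur : List Char) (acc : List (List Char)),
      PySem.Chars.splitOn.go sep fuel l cur acc
      = acc.reverse ++ PySem.Chars.splitOn.go sep fuel l cur [] := by
  intro fuel
  induction fuel with
  | zero => intro l cur acc; simp [PySem.Chars.splitOn.go]
  | succ fuel ih =>
    intro l cur acc
    cases l with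
    | nil => simp [PySem.Chars.splitOn.go]
    | cons c rest =>
      by_cases hp : sep.isPrefixOf (c :: rest) = true
      · rw [show PySem.Chars.splitOn.go sep (fuel + 1) (c :: rest) cur acc
              = PySem.Chars.splitOn.go sep fuel (List.drop sep.length (c :: rest)) []
                  (cur.reverse :: acc) from by simp [PySem.Chars.splitOn.go, hp],
            show PySem.Chars.splitOn.go sep (fuel + 1) (c :: rest) cur []
              = PySem.Chars.splitOn.go sep fuel (List.drop sep.length (c :: rest)) []
                  (cur.reverse :: []) from by simp [PySem.Chars.splitOn.go, hp],
            ih _ _ (cur.reverse :: acc), ih _ _ (cur.reverse :: [])]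
        simp
      · rw [show PySem.Chars.splitOn.go sep (fuel + 1) (c :: rest) cur acc
              = PySem.Chars.splitOn.go sep fuel rest (c :: cur) acc from by
              simp [PySem.Chars.splitOn.go, Bool.eq_false_iff.mpr hp],
            show PySem.Chars.splitOn.go sep (fuel + 1) (c :: rest) cur []
              = PySem.Chars.splitOn.go sep fuel rest (c :: cur) [] from by
              simp [PySem.Chars.splitOn.go, Bool.eq_false_iff.mpr hp],
            ih rest (c :: cur) acc]

-- B's scanner emits exactly the splitOn pieces, in order
lemma pv_scan_eq_go (dl : List Char) (hdl : dl ≠ []) :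
    ∀ (fuel : Nat) (l token : List Char) (parsed : PySem.Set String),
      l.length ≤ fuel →
      pvScan dl fuel l token parsed
      = (PySem.Chars.splitOn.go dl (fuel + 1) l token.reverse []).foldl pvEmit parsed := by
  intro fuel
  induction fuel with
  | zero =>
    intro l token parsed h
    have : l = [] := List.length_eq_zero_iff.mp (Nat.le_zero.mp h)
    subst this
    simp [pvScan, PySem.Chars.splitOn.go]
  | succ fuel ih =>
    intro l token parsed h
    cases l with
    | nil => simp [pvScan, PySem.Chars.splitOn.go]
    | cons c rest =>
      have hdl1 : 1 ≤ dl.length := by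
        cases dl with
        | nil => exact absurd rfl hdl
        | cons a t => simp
      by_cases hp : dl.isPrefixOf (c :: rest) = true
      · rw [show pvScan dl (fuel + 1) (c :: rest) token parsed
              = pvScan dl fuel (List.drop dl.length (c :: rest)) [] (pvEmit parsed token) from by
              rw [pvScan]; simp [hdl, hp],
            show PySem.Chars.splitOn.go dl (fuel + 1 + 1) (c :: rest) token.reverse []
              = PySem.Chars.splitOn.go dl (fuel + 1) (List.drop dl.length (c :: rest)) []
                  (token.reverse.reverse :: []) from by simp [PySem.Chars.splitOn.go, hp],
            pv_go_acc dl (fuel + 1) _ [] (token.reverse.reverse :: [])]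
        have hlen : (List.drop dl.length (c :: rest)).length ≤ fuel := by
          simp only [List.length_drop, List.length_cons]
          simp only [List.length_cons] at h
          omega
        rw [ih (List.drop dl.length (c :: rest)) [] (pvEmit parsed token) hlen]
        simp
      · rw [show pvScan dl (fuel + 1) (c :: rest) token parsed
              = pvScan dl fuel rest (token ++ [c]) parsed from by
              rw [pvScan]; simp [hp],
            show PySem.Chars.splitOn.go dl (fuel + 1 + 1) (c :: rest) token.reverse []
              = PySem.Chars.splitOn.go dl (fuel + 1) rest (c :: token.reverse) [] from by
              simp [PySem.Chars.splitOn.go, Bool.eq_false_iff.mpr hp],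
            ih rest (token ++ [c]) parsed (by simp only [List.length_cons] at h; omega)]
        simp

-- per element, B's scan is a fold of Set.add over the formatted split pieces
lemma pv_scan_eq_fold (d e : String) (hd : d ≠ "") (parsed : PySem.Set String) :
    pvScan d.toList e.toList.length e.toList [] parsed
    = (pvSeqB d e).foldl PySem.Set.add parsed := by
  have hdl : d.toList ≠ [] := pv_toList_ne_nil d hd
  rw [show pvScan d.toList e.toList.length e.toList [] parsed
        = (PySem.Chars.splitOn.go d.toList (e.toList.length + 1) e.toList [] []).foldl
            pvEmit parsed from by
        simpa using pv_scan_eq_go d.toList hdl e.toList.length e.toList [] parsed (by omega),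
      show PySem.Chars.splitOn.go d.toList (e.toList.length + 1) e.toList [] []
        = PySem.Chars.splitOn e.toList d.toList from rfl,
      pvSeqB, pv_split?_eq_some e d hd]
  simp only [Option.getD_some, List.map_map, List.foldl_map]
  rfl

-- the inner guarded loop adds exactly the formatted non-empty parts
lemma pv_inner_loop (parts : List String) :
    ∀ (s : PySem.Set String),
      parts.foldl (fun ps p => if p = "" then ps else PySem.Set.add ps (pvFmt p)) s
      = ((parts.filter (fun p => p ≠ "")).map pvFmt).foldl PySem.Set.add s := by
  induction parts with
  | nil => intro s; rfl
  | cons p parts ih =>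
    intro s
    simp only [List.foldl_cons, List.filter_cons]
    by_cases hp : p = ""
    · rw [if_pos hp, show (decide (p ≠ "")) = false from by simp [hp],
          if_neg Bool.false_ne_true]
      exact ih s
    · rw [if_neg hp, show (decide (p ≠ "")) = true from by simp [hp], if_pos rfl,
          List.map_cons, List.foldl_cons]
      exact ih (PySem.Set.add s (pvFmt p))

-- a loop folding add over each element's hits is one fold over the flattened hits
lemma pv_foldl_flat (g : String → List String) :
    ∀ (l : List String) (s : PySem.Set String),
      l.foldl (fun ps e => (g e).foldl PySem.Set.add ps) s
      = (l.flatMap g).foldl PySem.Set.add s := by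
  intro l
  induction l with
  | nil => intro s; rfl
  | cons e l ih => intro s; simp only [List.flatMap_cons, List.foldl_append, List.foldl_cons, ih]

-- discarding "" afterwards equals never inserting "" at all
lemma pv_discard_foldl (l : List String) :
    ∀ (s : PySem.Set String),
      PySem.Set.discard (l.foldl PySem.Set.add s) ""
      = (l.filter (fun x => x ≠ "")).foldl PySem.Set.add (PySem.Set.discard s "") := by
  induction l with
  | nil => intro s; rfl
  | cons x l ih =>
    intro s
    by_cases hx : x = ""
    · subst hx
      have hstep : PySem.Set.discard (PySem.Set.add s "") "" = PySem.Set.discard s "" := by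
        by_cases hm : ("" : String) ∈ s
        · rw [PySem.Set.add_of_mem hm]
        · rw [PySem.Set.add_of_not_mem hm]
          simp [PySem.Set.discard, List.filter_append]
      simp only [List.foldl_cons, List.filter_cons]
      rw [show (decide (("" : String) ≠ "")) = false from by simp, if_neg Bool.false_ne_true,
          ih, hstep]
    · have hstep : PySem.Set.discard (PySem.Set.add s x) ""
          = PySem.Set.add (PySem.Set.discard s "") x := by
        by_cases hm : x ∈ s
        · rw [PySem.Set.add_of_mem hm,
              PySem.Set.add_of_mem (by rw [PySem.Set.mem_discard]; exact ⟨hm, hx⟩)]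
        · rw [PySem.Set.add_of_not_mem hm,
              PySem.Set.add_of_not_mem (by rw [PySem.Set.mem_discard]; tauto)]
          simp [PySem.Set.discard, List.filter_append, hx]
      simp only [List.foldl_cons, List.filter_cons]
      rw [show (decide (x ≠ "")) = true from by simp [hx], if_pos rfl,
          List.foldl_cons, ih, hstep]

-- pvFmt sends "" to "", so pre-filtering the raw parts changes nothing after the final filter
lemma pv_filter_map_filter (parts : List String) :
    ((parts.filter (fun p => p ≠ "")).map pvFmt).filter (fun x => x ≠ "")
    = (parts.map pvFmt).filter (fun x => x ≠ "") := by
  induction parts with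
  | nil => rfl
  | cons p parts ih =>
    simp only [List.filter_cons, List.map_cons]
    by_cases hp : p = ""
    · rw [show (decide (p ≠ "")) = false from by simp [hp], if_neg Bool.false_ne_true, ih,
          show (decide (pvFmt p ≠ "")) = false from by
            rw [hp]; simp [show pvFmt "" = "" from by decide],
          if_neg Bool.false_ne_true]
    · rw [show (decide (p ≠ "")) = true from by simp [hp], if_pos rfl, List.map_cons,
          List.filter_cons, ih]

-- A's trailing "if '' in set: remove('')" is exactly Set.discard
lemma pv_final_eq_discard (s : PySem.Set String) :
    (if PySem.Set.contains s "" then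
       match PySem.Set.remove? s "" with
       | some t => t
       | none => s
     else s) = PySem.Set.discard s "" := by
  by_cases h : ("" : String) ∈ s
  · have hc : PySem.Set.contains s "" = true := by simpa using h
    rw [if_pos hc]
    unfold PySem.Set.remove?
    rw [if_pos hc]
  · have hc : ¬ PySem.Set.contains s "" = true := by simpa using h
    rw [if_neg hc]
    unfold PySem.Set.discard
    symm
    apply List.filter_eq_self.mpr
    intro y hy
    by_cases hy' : y = ""
    · exact absurd (hy' ▸ hy) h
    · simp [hy']

-- the element-wise filtered sequences of A and B coincide
lemma pv_seq_filter_eq (d e : String) (hd : d ≠ "") :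
    (pvSeqA d e).filter (fun x => x ≠ "") = (pvSeqB d e).filter (fun x => x ≠ "") := by
  by_cases hin : PySem.Str.isIn d e = true
  · rw [pvSeqA, if_pos hin, pvSeqB]
    exact pv_filter_map_filter _
  · rw [pvSeqA, if_neg hin, pvSeqB,
        pv_split?_no_match e d hd (Bool.eq_false_iff.mpr hin)]
    rfl

theorem list_to_parsed_set_spec_aux :
    ∀ (unparsed_list : List String) (delimiter : String),
      Pre_list_to_parsed_set unparsed_list delimiter →
      list_to_parsed_set unparsed_list delimiter = list_to_parsed_set_alt unparsed_list delimiter := by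
  intro ul d hpre
  by_cases hd : d = ""
  · -- Pre_ forces ul = []; both programs return the empty set
    have hnil : ul = [] := by
      cases hpre with
      | inl h => exact h
      | inr h => exact absurd hd h
    subst hnil; rfl
  · -- the general case: both sides are one fold of Set.add over the same filtered flat list
    unfold list_to_parsed_set list_to_parsed_set_alt
    rw [pv_final_eq_discard]
    have hbody : ∀ (l : List String) (s : PySem.Set String),
        l.foldl (fun parsed_set element =>
          if PySem.Str.isIn d element then
            match PySem.Str.split? element d with
            | some parts =>
                parts.foldl (fun parsed_set p =>
                  let fmt_element := PySem.Str.lower (PySem.Str.strip p)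
                  if p ≠ "" then PySem.Set.add parsed_set fmt_element else parsed_set) parsed_set
            | none => parsed_set
          else
            let fmt_element := PySem.Str.lower (PySem.Str.strip element)
            PySem.Set.add parsed_set fmt_element) s
        = l.foldl (fun ps e => (pvSeqA d e).foldl PySem.Set.add ps) s := by
      intro l
      induction l with
      | nil => intro s; rfl
      | cons e l ih =>
        intro s
        simp only [List.foldl_cons]
        rw [ih]
        congr 1
        by_cases hin : PySem.Str.isIn d e = true
        · rw [if_pos hin, pv_split?_eq_some e d hd, pvSeqA, if_pos hin,
              pv_split?_eq_some e d hd]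
          simpa [pvFmt] using
            pv_inner_loop ((PySem.Chars.splitOn e.toList d.toList).map String.ofList) s
        · rw [if_neg hin, pvSeqA, if_neg hin]
          rfl
    have hbodyB : ∀ (l : List String) (s : PySem.Set String),
        l.foldl (fun parsed element =>
            pvScan d.toList element.toList.length element.toList [] parsed) s
        = l.foldl (fun ps e => (pvSeqB d e).foldl PySem.Set.add ps) s := by
      intro l
      induction l with
      | nil => intro s; rfl
      | cons e l ih =>
        intro s
        simp only [List.foldl_cons]
        rw [pv_scan_eq_fold d e hd s]
        exact ih _
    rw [hbody, hbodyB, pv_foldl_flat (pvSeqA d), pv_foldl_flat (pvSeqB d),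
        pv_discard_foldl, pv_discard_foldl, List.filter_flatMap, List.filter_flatMap]
    have hflat : ((PySem.List.sorted ul (fun x => x) false).flatMap
          (fun a => (pvSeqA d a).filter (fun x => x ≠ "")))
        = ((PySem.List.sorted ul (fun x => x) false).flatMap
          (fun a => (pvSeqB d a).filter (fun x => x ≠ ""))) := by
      apply List.flatMap_congr
      intro a _
      exact pv_seq_filter_eq d a hd
    rw [hflat]

-- ===== VERDICT (by name: the statements are the Claim_ definitions above) =====
theorem list_to_parsed_set_spec : Claim_equal_list_to_parsed_set := by
  intro ul d _ hpre
  unfold Spec_list_to_parsed_set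
  exact list_to_parsed_set_spec_aux ul d hpre
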